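-- pv_equiv track=rewrite | github.com/drizztSun/common_project | PythonLeetcode/Leetcode/1246_PalindromeRemoval.py | doit_dp_1
-- ===== SOURCE A (Python) =====
-- def doit_dp_1(arr):
--     """
--     Idea is simple, we use DP array to memorize the status. DP[i][j] represents the minimum steps to remove this sub-array.
--     Thus DP[0][len(arr)-1] should be the final result. For a sub-array [i, j]. We consider such scenarios:
--
--     if arr[i] == arr[j], then we know after we transform [i+1][j-1] to a palindrome, the whole sub-array [i, j] will also be a palindrome.
--     But we still need to testify each part of this sub-array from left to right. For example, if the sub-array is [1,4,1,1,2,3,2,1],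
--     we should split this array to [1,4,1] and [1,2,3,2,1]. So we traverse the whole array and try to split the array [i, j] to [i, k], [k+1, j],
--     whereas i <= k < j.
--     DP[i][j] should be the smallest value from previous two conditions.
--     """
--     dp = [[0] * len(arr) for _ in range(len(arr))]
--     for j in range(len(arr)):
--         for i in range(j, -1, -1):
--             r = len(arr)
--             if arr[i] == arr[j]:
--                 r = 1 if i + 1 > j - 1 or dp[i+1][j-1] == 0 else dp[i+1][j-1]
--             for k in range(i, j):
--                 r = min(r, dp[i][k] + dp[k+1][j])
--             dp[i][j] = r
--     return dp[0][len(arr)-1]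
-- ===== SOURCE B (Python) =====
-- def doit_dp_1(arr):
--     n = len(arr)
--     memo = {}
--
--     def solve(i, j):
--         if i > j:
--             return 0
--         if i == j:
--             return 1
--         if (i, j) in memo:
--             return memo[(i, j)]
--         if arr[i] == arr[j]:
--             inner = solve(i + 1, j - 1)
--             r = 1 if inner == 0 else inner
--         else:
--             r = n
--         for k in range(i, j):
--             r = min(r, solve(i, k) + solve(k + 1, j))
--         memo[(i, j)] = r
--         return r
--
--     return solve(0, n - 1)
-- ===== Notes on version B (the rewrite author's own statement) =====
-- stated objective: alternative
-- what changed: bottom-up two-nested-loop DP table replaced by a top-down memoized recursion solve(i,j) over intervals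
-- crash fix: On the empty list A raises IndexError (dp[0][-1] on an empty table) while B returns 0. — e.g. on doit_dp_1([]): A raises IndexError, B returns 0
import Mathlib
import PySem

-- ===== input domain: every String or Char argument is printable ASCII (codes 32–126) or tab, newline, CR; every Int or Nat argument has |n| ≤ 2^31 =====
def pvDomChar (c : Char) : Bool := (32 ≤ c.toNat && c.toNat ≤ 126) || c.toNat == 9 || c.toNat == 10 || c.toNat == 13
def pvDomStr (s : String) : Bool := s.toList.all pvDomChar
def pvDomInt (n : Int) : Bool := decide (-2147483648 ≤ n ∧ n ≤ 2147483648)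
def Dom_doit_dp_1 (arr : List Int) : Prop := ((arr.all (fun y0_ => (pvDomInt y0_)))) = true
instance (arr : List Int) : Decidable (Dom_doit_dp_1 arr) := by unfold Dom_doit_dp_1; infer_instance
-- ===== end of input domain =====

set_option maxRecDepth 4096

-- B replaces A's bottom-up DP table by a top-down memoized recursion over intervals; equal
-- return values on every non-empty list, and B returns 0 on [] where A raises IndexError.

-- ===== PORT A =====
-- dp[i][j] (the 2-D list, read with Python indexing)
def pvGetA (dp : List (List Int)) (p q : Int) : Int :=
  PySem.List.pyGetD (PySem.List.pyGetD dp p []) q 0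

-- dp[i][j] = r
def pvSetA (dp : List (List Int)) (i j r : Int) : List (List Int) :=
  PySem.List.pySetD dp i (PySem.List.pySetD (PySem.List.pyGetD dp i []) j r)

-- the body of the inner loop: the value r computed for cell (i, j)
def pvCellA (arr : List Int) (n : Int) (dp : List (List Int)) (i j : Int) : Int :=
  let r : Int := n
  let r := if arr.getD i.toNat 0 = arr.getD j.toNat 0 then
      (if i + 1 > j - 1 ∨ pvGetA dp (i+1) (j-1) = 0 then 1 else pvGetA dp (i+1) (j-1))
    else r
  (PySem.List.pyRange i j 1).foldl (fun r k => min r (pvGetA dp i k + pvGetA dp (k+1) j)) r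

-- one iteration of the outer loop: 'for i in range(j, -1, -1): … dp[i][j] = r'
def pvColA (arr : List Int) (n : Int) (dp : List (List Int)) (j : Int) : List (List Int) :=
  (PySem.List.pyRange j (-1) (-1)).foldl (fun dp i => pvSetA dp i j (pvCellA arr n dp i j)) dp

def doit_dp_1 (arr : List Int) : Int :=
  let n : Int := arr.length
  let dp0 := (PySem.List.pyRange 0 n 1).map (fun _ => List.replicate arr.length (0 : Int))
  pvGetA ((PySem.List.pyRange 0 n 1).foldl (pvColA arr n) dp0) 0 (n - 1)

-- ===== PORT B =====
-- transliteration of Source B: solve(i, j) with a dict memo; the 'for k in range(i, j)' loop is a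
-- foldl over range(i, j) threading (r, memo); the fuel argument is only a totality guard
-- (any fuel > the interval span computes the same value; the top call passes enough).
def pvSolveBF (arr : List Int) (n : Int) :
    Nat → Int → Int → PySem.Dict (Int × Int) Int → Int × PySem.Dict (Int × Int) Int
  | 0, _, _, memo => (0, memo)
  | fuel+1, i, j, memo =>
    if i > j then (0, memo)
    else if i = j then (1, memo)
    else match PySem.Dict.get? memo (i, j) with
      | some v => (v, memo)
      | none =>
        let p := if arr.getD i.toNat 0 = arr.getD j.toNat 0 then
            let q := pvSolveBF arr n fuel (i+1) (j-1) memo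
            ((if q.1 = 0 then 1 else q.1), q.2)
          else (n, memo)
        let s := (PySem.List.pyRange i j 1).foldl (fun rm k =>
            let x := pvSolveBF arr n fuel i k rm.2
            let y := pvSolveBF arr n fuel (k+1) j x.2
            (min rm.1 (x.1 + y.1), y.2)) p
        (s.1, PySem.Dict.insert s.2 (i, j) s.1)

def doit_dp_1_alt (arr : List Int) : Int :=
  let n : Int := arr.length
  (pvSolveBF arr n (arr.length + 1) 0 (n - 1) PySem.Dict.empty).1

-- ===== PRECONDITION & SPEC =====
-- Pre_ excludes only the empty list, on which A raises IndexError (dp[0][-1] of an empty table).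
def Pre_doit_dp_1 (arr : List Int) : Prop := arr ≠ []
instance (arr : List Int) : Decidable (Pre_doit_dp_1 arr) := by unfold Pre_doit_dp_1; infer_instance

def pvWitness_doit_dp_1 : List Int := [1, 4, 1, 1, 2, 3, 2, 1]

-- On the empty list A raises IndexError (dp[0][-1] on an empty table) while B returns 0.
def Raises_doit_dp_1 (arr : List Int) : Prop := arr = []
instance (arr : List Int) : Decidable (Raises_doit_dp_1 arr) := by unfold Raises_doit_dp_1; infer_instance
def pvRaiseWitness_doit_dp_1 : List Int := []
def pvRaiseWitnessOut_doit_dp_1 : Int := 0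

def Spec_doit_dp_1 (arr : List Int) (out : Int) : Prop := out = doit_dp_1_alt arr
instance (arr : List Int) (out : Int) : Decidable (Spec_doit_dp_1 arr out) := by unfold Spec_doit_dp_1; infer_instance

-- ===== CLAIM (what is proved, stated in full; the proofs are below) =====
def Claim_equal_doit_dp_1 : Prop := ∀ (arr : List Int), Dom_doit_dp_1 arr → Pre_doit_dp_1 arr → Spec_doit_dp_1 arr (doit_dp_1 arr)
def Claim_raises_doit_dp_1 : Prop := (∀ (arr : List Int), Dom_doit_dp_1 arr → Raises_doit_dp_1 arr → ¬ Pre_doit_dp_1 arr) ∧ (Dom_doit_dp_1 (pvRaiseWitness_doit_dp_1) ∧ Raises_doit_dp_1 (pvRaiseWitness_doit_dp_1) ∧ doit_dp_1_alt (pvRaiseWitness_doit_dp_1) = pvRaiseWitnessOut_doit_dp_1)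

-- ===== LEMMAS AND PROOFS =====

-- termination helper for the mutual recursion pvF/pvFsp below (cited in decreasing_by)
theorem pvLexNat {a b c d : Nat} (h : a < c ∨ (a = c ∧ b < d)) :
    Prod.Lex (fun x y : Nat => x < y) (fun x y : Nat => x < y) (a, b) (c, d) := by
  rcases h with h | ⟨h1, h2⟩
  · exact Prod.Lex.left _ _ h
  · subst h1; exact Prod.Lex.right _ h2

-- The common recurrence as a pure function: the bridge between the two ports.
mutual
def pvF (arr : List Int) (n : Int) (i j : Int) : Int :=
  if i > j then 0
  else if i = j then 1
  else
    let r := if arr.getD i.toNat 0 = arr.getD j.toNat 0 then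
        (if pvF arr n (i+1) (j-1) = 0 then 1 else pvF arr n (i+1) (j-1))
      else n
    pvFsp arr n i j i r
termination_by ((j + 1 - i).toNat + 1, 0)
decreasing_by
  all_goals apply pvLexNat; omega

def pvFsp (arr : List Int) (n : Int) (i j k r : Int) : Int :=
  if h : k < j ∧ i ≤ k then
    pvFsp arr n i j (k+1) (min r (pvF arr n i k + pvF arr n (k+1) j))
  else r
termination_by ((j + 1 - i).toNat, (j - k).toNat)
decreasing_by
  all_goals apply pvLexNat; omega
end

-- ---- B side: the memo only ever holds correct values, so pvSolveB computes pvF ----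
def pvGood (arr : List Int) (n : Int) (memo : PySem.Dict (Int × Int) Int) : Prop :=
  ∀ i j v, PySem.Dict.get? memo (i, j) = some v → v = pvF arr n i j

theorem pvBF_correct (arr : List Int) (n : Int) :
    ∀ (fuel : Nat) (i j : Int) (memo : PySem.Dict (Int × Int) Int),
      (j + 1 - i).toNat + 1 ≤ fuel + 1 → pvGood arr n memo →
      (pvSolveBF arr n (fuel+1) i j memo).1 = pvF arr n i j ∧
        pvGood arr n (pvSolveBF arr n (fuel+1) i j memo).2 := by
  intro fuel
  induction fuel using Nat.strong_induction_on with
  | _ fuel ihf =>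
  intro i j memo hfu hg
  rw [pvSolveBF]
  by_cases h1 : i > j
  · rw [if_pos h1, pvF.eq_def, if_pos h1]
    exact ⟨rfl, hg⟩
  rw [if_neg h1]
  by_cases h2 : i = j
  · rw [if_pos h2, pvF.eq_def, if_neg (h2 ▸ h1), if_pos h2]
    exact ⟨by simp, hg⟩
  rw [if_neg h2]
  rcases hv : PySem.Dict.get? memo (i, j) with _ | v
  case neg.some =>
    simp only []
    exact ⟨hg _ _ _ hv, hg⟩
  case neg.none =>
  simp only []
  have hlt : i < j := by omega
  rcases fuel with _ | fuel'
  · omega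
  have hIH := ihf fuel' (by omega)
  have hloop : ∀ (m : Nat) (k : Int), i ≤ k → (j - k).toNat = m →
      ∀ (r : Int) (memo' : PySem.Dict (Int × Int) Int), pvGood arr n memo' →
      ((PySem.List.pyRange k j 1).foldl (fun rm k' =>
          let x := pvSolveBF arr n (fuel'+1) i k' rm.2
          let y := pvSolveBF arr n (fuel'+1) (k'+1) j x.2
          (min rm.1 (x.1 + y.1), y.2)) (r, memo')).1 = pvFsp arr n i j k r ∧
      pvGood arr n ((PySem.List.pyRange k j 1).foldl (fun rm k' =>
          let x := pvSolveBF arr n (fuel'+1) i k' rm.2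
          let y := pvSolveBF arr n (fuel'+1) (k'+1) j x.2
          (min rm.1 (x.1 + y.1), y.2)) (r, memo')).2 := by
    intro m
    induction m with
    | zero =>
      intro k hik hm r memo' hg'
      rw [PySem.List.pyRange_one_eq_nil (by omega)]
      rw [pvFsp.eq_def, dif_neg (by omega)]
      exact ⟨rfl, hg'⟩
    | succ m ihm =>
      intro k hik hm r memo' hg'
      have hkj : k < j := by omega
      rw [PySem.List.pyRange_one_cons (by omega)]
      simp only [List.foldl_cons]
      obtain ⟨ex, gx⟩ := hIH i k memo' (by omega) hg'
      obtain ⟨ey, gy⟩ := hIH (k+1) j _ (by omega) gx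
      rw [pvFsp.eq_def, dif_pos ⟨hkj, hik⟩]
      have hrec := ihm (k+1) (by omega) (by omega)
        (min r (pvF arr n i k + pvF arr n (k+1) j))
        (pvSolveBF arr n (fuel'+1) (k+1) j (pvSolveBF arr n (fuel'+1) i k memo').2).2 gy
      rw [ex, ey]
      exact hrec
  by_cases hm : arr.getD i.toNat 0 = arr.getD j.toNat 0
  · simp only [if_pos hm]
    obtain ⟨e, g⟩ := hIH (i+1) (j-1) memo (by omega) hg
    rw [e]
    have hF : pvF arr n i j = pvFsp arr n i j i
        (if pvF arr n (i+1) (j-1) = 0 then 1 else pvF arr n (i+1) (j-1)) := by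
      rw [pvF.eq_def, if_neg h1, if_neg h2]
      simp only [if_pos hm]
    obtain ⟨hl1, hl2⟩ := hloop (j - i).toNat i le_rfl rfl
      (if pvF arr n (i+1) (j-1) = 0 then 1 else pvF arr n (i+1) (j-1))
      (pvSolveBF arr n (fuel'+1) (i+1) (j-1) memo).2 g
    refine ⟨by rw [hl1, hF], ?_⟩
    intro i' j' v hvm
    rw [PySem.Dict.get?_insert] at hvm
    by_cases he : (i', j') = (i, j)
    · rw [if_pos he] at hvm
      obtain ⟨rfl, rfl⟩ : i' = i ∧ j' = j := Prod.ext_iff.mp he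
      cases hvm
      rw [hl1, ← hF]
    · rw [if_neg he] at hvm
      exact hl2 _ _ _ hvm
  · simp only [if_neg hm]
    have hF : pvF arr n i j = pvFsp arr n i j i n := by
      rw [pvF.eq_def, if_neg h1, if_neg h2]
      simp only [if_neg hm]
    obtain ⟨hl1, hl2⟩ := hloop (j - i).toNat i le_rfl rfl n memo hg
    refine ⟨by rw [hl1, hF], ?_⟩
    intro i' j' v hvm
    rw [PySem.Dict.get?_insert] at hvm
    by_cases he : (i', j') = (i, j)
    · rw [if_pos he] at hvm
      obtain ⟨rfl, rfl⟩ : i' = i ∧ j' = j := Prod.ext_iff.mp he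
      cases hvm
      rw [hl1, ← hF]
    · rw [if_neg he] at hvm
      exact hl2 _ _ _ hvm

-- ---- A side: table invariant ----
def pvShape (dp : List (List Int)) (N : Nat) : Prop :=
  dp.length = N ∧ ∀ row ∈ dp, row.length = N

-- reading after writing one cell (all indices in range)
theorem pvGetA_setA (dp : List (List Int)) (i j r p q : Int)
    (hp : 0 ≤ p) (hq : 0 ≤ q) (hi : 0 ≤ i) (hj : 0 ≤ j)
    (hil : i.toNat < dp.length) (hjl : j.toNat < (dp.getD i.toNat []).length) :
    pvGetA (pvSetA dp i j r) p q = if p = i ∧ q = j then r else pvGetA dp p q := by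
  unfold pvGetA pvSetA
  rw [PySem.List.pySetD_of_nonneg _ _ hi, PySem.List.pySetD_of_nonneg _ _ hj,
      PySem.List.pyGetD_of_nonneg _ _ hi, PySem.List.pyGetD_of_nonneg _ _ hp,
      PySem.List.pyGetD_of_nonneg _ _ hq,
      PySem.List.pyGetD_of_nonneg _ _ hp, PySem.List.pyGetD_of_nonneg _ _ hq]
  have hrow : (dp.set i.toNat ((dp.getD i.toNat []).set j.toNat r)).getD p.toNat []
      = if p.toNat = i.toNat then (dp.getD i.toNat []).set j.toNat r
        else dp.getD p.toNat [] := by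
    by_cases hpi : p.toNat = i.toNat
    · rw [if_pos hpi, hpi, List.getD_eq_getElem?_getD, List.getElem?_set_self hil,
          Option.getD_some]
    · rw [if_neg hpi, List.getD_eq_getElem?_getD,
          List.getElem?_set_ne (fun h => hpi h.symm), ← List.getD_eq_getElem?_getD]
  rw [hrow]
  by_cases hpi : p = i
  · have hpn : p.toNat = i.toNat := by omega
    rw [if_pos hpn]
    by_cases hqj : q = j
    · have hqn : q.toNat = j.toNat := by omega
      rw [hqn, List.getD_eq_getElem?_getD, List.getElem?_set_self hjl, Option.getD_some,
          if_pos ⟨hpi, hqj⟩]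
    · have hqn : q.toNat ≠ j.toNat := by omega
      rw [List.getD_eq_getElem?_getD, List.getElem?_set_ne (fun h => hqn h.symm),
          ← List.getD_eq_getElem?_getD, if_neg (by tauto), hpi]
  · have hpn : p.toNat ≠ i.toNat := by omega
    rw [if_neg hpn, if_neg (by tauto)]

theorem pvShape_setA (dp : List (List Int)) (N : Nat) (i j r : Int) (hi : 0 ≤ i)
    (hil : i.toNat < dp.length) (hs : pvShape dp N) : pvShape (pvSetA dp i j r) N := by
  obtain ⟨h1, h2⟩ := hs
  constructor
  · rw [pvSetA, PySem.List.length_pySetD, h1]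
  · intro row hrow
    rw [pvSetA, PySem.List.pySetD_of_nonneg _ _ hi] at hrow
    rcases List.mem_or_eq_of_mem_set hrow with h | h
    · exact h2 _ h
    · subst h
      rw [PySem.List.length_pySetD, PySem.List.pyGetD_of_nonneg _ _ hi,
          List.getD_eq_getElem dp [] hil]
      exact h2 _ (List.getElem_mem hil)

-- the set of already-computed cells when the inner loop is about to process row i of column j
def pvScol (j i p q : Int) : Prop :=
  (0 ≤ p ∧ p ≤ q ∧ q < j) ∨ (q = j ∧ 0 ≤ p ∧ i ≤ p ∧ p ≤ j)
def pvInv (arr : List Int) (n : Int) (dp : List (List Int)) (j i : Int) : Prop :=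
  pvShape dp arr.length ∧
    ∀ p q : Int, pvScol j i p q → pvGetA dp p q = pvF arr n p q

theorem pvFold_eq (arr : List Int) (n : Int) (dp : List (List Int)) (i j : Int)
    (h0 : 0 ≤ i) (hinv : pvInv arr n dp j (i+1)) :
    ∀ (m : Nat) (k r : Int), (j - k).toNat = m → i ≤ k →
      (PySem.List.pyRange k j 1).foldl (fun r k' => min r (pvGetA dp i k' + pvGetA dp (k'+1) j)) r
        = pvFsp arr n i j k r := by
  intro m
  induction m with
  | zero =>
    intro k r hm hik
    rw [PySem.List.pyRange_one_eq_nil (by omega)]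
    rw [pvFsp.eq_def]
    simp only [List.foldl_nil]
    rw [dif_neg (by omega)]
  | succ m ih =>
    intro k r hm hik
    have hkj : k < j := by omega
    have hdk : pvGetA dp i k = pvF arr n i k := hinv.2 i k (Or.inl ⟨h0, hik, hkj⟩)
    have hdj : pvGetA dp (k+1) j = pvF arr n (k+1) j :=
      hinv.2 (k+1) j (Or.inr ⟨rfl, by omega, by omega, by omega⟩)
    have hstep : pvFsp arr n i j k r
        = pvFsp arr n i j (k+1) (min r (pvF arr n i k + pvF arr n (k+1) j)) := by
      rw [pvFsp.eq_def, dif_pos ⟨hkj, hik⟩]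
    rw [PySem.List.pyRange_one_cons (by omega)]
    simp only [List.foldl_cons]
    rw [hdk, hdj, ih (k+1) _ (by omega) (by omega), hstep]

theorem pvCellA_eq (arr : List Int) (n : Int) (dp : List (List Int)) (i j : Int)
    (h0 : 0 ≤ i) (hij : i ≤ j) (hinv : pvInv arr n dp j (i+1)) :
    pvCellA arr n dp i j = pvF arr n i j := by
  rcases eq_or_lt_of_le hij with heq | hlt
  · subst heq
    unfold pvCellA
    rw [PySem.List.pyRange_one_eq_nil (by omega)]
    simp only [List.foldl_nil]
    simp only [if_true]
    rw [if_pos (Or.inl (by omega : i + 1 > i - 1))]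
    rw [pvF.eq_def]
    simp
  · have hne1 : ¬ i > j := by omega
    have hne2 : ¬ i = j := by omega
    unfold pvCellA
    rw [pvFold_eq arr n dp i j h0 hinv (j - i).toNat i _ rfl le_rfl]
    conv_rhs => rw [pvF.eq_def]
    rw [if_neg hne1, if_neg hne2]
    simp only []
    congr 1
    by_cases hm : arr.getD i.toNat 0 = arr.getD j.toNat 0
    · rw [if_pos hm, if_pos hm]
      by_cases hsm : i + 1 > j - 1
      · have hz : pvF arr n (i+1) (j-1) = 0 := by
          rw [pvF.eq_def, if_pos (by omega : i + 1 > j - 1)]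
        rw [if_pos (Or.inl hsm), if_pos hz]
      · have hd : pvGetA dp (i+1) (j-1) = pvF arr n (i+1) (j-1) :=
          hinv.2 (i+1) (j-1) (Or.inl ⟨by omega, by omega, by omega⟩)
        rw [hd]
        by_cases hz : pvF arr n (i+1) (j-1) = 0
        · rw [if_pos (Or.inr hz), if_pos hz]
        · rw [if_neg (by tauto), if_neg hz]
    · rw [if_neg hm, if_neg hm]

theorem pvStep_inv (arr : List Int) (n : Int) (dp : List (List Int)) (i j : Int)
    (hn : n = arr.length) (h0 : 0 ≤ i) (hij : i ≤ j) (hjn : j < n)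
    (hinv : pvInv arr n dp j (i+1)) :
    pvInv arr n (pvSetA dp i j (pvCellA arr n dp i j)) j i := by
  have hil : i.toNat < dp.length := by
    rw [hinv.1.1]; omega
  have hjl : j.toNat < (dp.getD i.toNat []).length := by
    rw [List.getD_eq_getElem dp [] hil, hinv.1.2 _ (List.getElem_mem hil)]; omega
  constructor
  · exact pvShape_setA dp arr.length i j _ h0 hil hinv.1
  · intro p q hs
    have hp : 0 ≤ p := by unfold pvScol at hs; omega
    have hq : 0 ≤ q := by unfold pvScol at hs; omega
    rw [pvGetA_setA dp i j _ p q hp hq h0 (by omega) hil hjl]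
    by_cases he : p = i ∧ q = j
    · rw [if_pos he, he.1, he.2]
      exact pvCellA_eq arr n dp i j h0 hij hinv
    · rw [if_neg he]
      refine hinv.2 p q ?_
      unfold pvScol at hs ⊢
      rcases he' : decide (p = i) with _ | _ <;> rcases he'' : decide (q = j) with _ | _ <;>
        simp at he' he'' <;> omega

theorem pvColFold (arr : List Int) (n : Int) (j : Int) (hn : n = arr.length)
    (hj : 0 ≤ j) (hjn : j < n) :
    ∀ (m : Nat) (i : Int), (i+1).toNat = m → -1 ≤ i → i ≤ j →
      ∀ dp, pvInv arr n dp j (i+1) →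
        pvInv arr n ((PySem.List.pyRange i (-1) (-1)).foldl
          (fun dp i => pvSetA dp i j (pvCellA arr n dp i j)) dp) j 0 := by
  intro m
  induction m with
  | zero =>
    intro i hm h1 h2 dp hinv
    have : i = -1 := by omega
    subst this
    rw [PySem.List.pyRange_neg_one_eq_nil (by omega)]
    simpa using hinv
  | succ m ih =>
    intro i hm h1 h2 dp hinv
    have h0 : 0 ≤ i := by omega
    rw [PySem.List.pyRange_neg_one_cons (by omega)]
    simp only [List.foldl_cons]
    exact ih (i-1) (by omega) (by omega) (by omega) _
      (by simpa using pvStep_inv arr n dp i j hn h0 h2 hjn hinv)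

theorem pvScol_shift (j p q : Int) : pvScol j 0 p q ↔ pvScol (j+1) (j+1+1) p q := by
  unfold pvScol
  omega

theorem pvOuter_inv (arr : List Int) (n : Int) (hn : n = arr.length) :
    ∀ (m : Nat) (j0 : Int), (n - j0).toNat = m → 0 ≤ j0 → j0 ≤ n →
      ∀ dp, pvInv arr n dp j0 (j0+1) →
        pvInv arr n ((PySem.List.pyRange j0 n 1).foldl (pvColA arr n) dp) n (n+1) := by
  intro m
  induction m with
  | zero =>
    intro j0 hm h0 h1 dp hinv
    have : j0 = n := by omega
    subst this
    rw [PySem.List.pyRange_one_eq_nil (by omega)]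
    exact hinv
  | succ m ih =>
    intro j0 hm h0 h1 dp hinv
    have hlt : j0 < n := by omega
    rw [PySem.List.pyRange_one_cons (by omega)]
    simp only [List.foldl_cons]
    refine ih (j0+1) (by omega) (by omega) (by omega) _ ?_
    have hcol := pvColFold arr n j0 hn h0 hlt (j0+1).toNat j0 rfl (by omega) le_rfl dp hinv
    unfold pvColA
    exact ⟨hcol.1, fun p q hs => hcol.2 p q ((pvScol_shift j0 p q).mpr hs)⟩

theorem pvA_correct (arr : List Int) (h : arr ≠ []) :
    doit_dp_1 arr = pvF arr arr.length 0 (arr.length - 1) := by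
  have hn : (1 : Int) ≤ arr.length := by
    have := List.length_pos_iff.mpr h
    omega
  unfold doit_dp_1
  simp only []
  have hinv0 : pvInv arr arr.length
      ((PySem.List.pyRange 0 arr.length 1).map (fun _ => List.replicate arr.length (0 : Int)))
      0 1 := by
    constructor
    · constructor
      · rw [List.length_map, PySem.List.length_pyRange_one]
        omega
      · intro row hrow
        rcases List.mem_map.mp hrow with ⟨_, _, rfl⟩
        exact List.length_replicate
    · intro p q hs
      unfold pvScol at hs
      omega
  have hres := pvOuter_inv arr arr.length rfl arr.length 0 (by omega) le_rfl (by omega)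
    _ hinv0
  exact hres.2 0 ((arr.length : Int) - 1) (Or.inl ⟨le_rfl, by omega, by omega⟩)

-- ===== VERDICT (by name: the statement is the Claim_ definition above) =====
theorem doit_dp_1_spec : Claim_equal_doit_dp_1 := by
  intro arr _ hpre
  unfold Spec_doit_dp_1 doit_dp_1_alt
  have hn : (1 : Int) ≤ arr.length := by
    have := List.length_pos_iff.mpr hpre
    omega
  have hA := pvA_correct arr hpre
  have hB := pvBF_correct arr arr.length arr.length 0 ((arr.length : Int) - 1) PySem.Dict.empty
    (by omega) (by intro i j v hv; simp [PySem.Dict.get?_empty] at hv)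
  simp only []
  rw [hA, hB.1]

@[simp] theorem doit_dp_1_raises : Claim_raises_doit_dp_1 := by
  unfold Claim_raises_doit_dp_1
  exact ⟨fun arr _ hr hp => hp hr, by decide, by decide, by decide⟩
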